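-- pv_equiv track=rewrite | github.com/itswillis/practice | Test Revision/2023 S0 Test/Q7.py | convert_dictionary
-- ===== SOURCE A (Python) =====
-- def convert_dictionary(scores_dictionary):
--     new_dict = {}
--
--     for key, value in scores_dictionary.items():
--         for word in value:
--             length = len(word)
--             tup = (word, key)
--
--             if length not in new_dict:
--                 new_dict[length] = [(word, key)]
--             else:
--                 new_dict[length].append(tup)
--
--     for length in new_dict:
--         new_dict[length] = sorted(new_dict[length], key=lambda x: x[0])
--
--     return new_dict
-- ===== SOURCE B (Python) =====
-- def convert_dictionary(scores_dictionary):
--     flat = [(word, key) for key, value in scores_dictionary.items() for word in value]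
--     lengths = list(dict.fromkeys(len(word) for word, _ in flat))
--     return {length: sorted([p for p in flat if len(p[0]) == length], key=lambda x: x[0])
--             for length in lengths}
-- ===== Notes on version B (the rewrite author's own statement) =====
-- stated objective: alternative
-- what changed: Replaces A's incremental dict-of-buckets building (membership test plus in-place append per word, then a second rewrite loop sorting each bucket) with a flat comprehension of (word, key) pairs, an ordered dedup of lengths via dict.fromkeys, and a single dict comprehension that filters and sorts each length's bucket.
import Mathlib
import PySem

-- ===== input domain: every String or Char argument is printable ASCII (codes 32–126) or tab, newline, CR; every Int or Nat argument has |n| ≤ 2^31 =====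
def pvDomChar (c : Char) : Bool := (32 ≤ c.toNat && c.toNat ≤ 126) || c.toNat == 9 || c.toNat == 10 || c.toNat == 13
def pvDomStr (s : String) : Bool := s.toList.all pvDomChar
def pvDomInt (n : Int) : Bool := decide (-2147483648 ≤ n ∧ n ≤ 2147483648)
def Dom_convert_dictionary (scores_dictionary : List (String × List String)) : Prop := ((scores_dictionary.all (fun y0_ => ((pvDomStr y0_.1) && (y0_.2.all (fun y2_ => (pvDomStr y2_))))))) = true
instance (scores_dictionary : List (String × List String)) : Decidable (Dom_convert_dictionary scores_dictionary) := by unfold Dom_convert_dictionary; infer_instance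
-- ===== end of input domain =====

-- B replaces A's incremental dict building and per-bucket rewrite loop with a flat pair list,
-- an ordered dedup of lengths, and one filter+sort per length (alternative decomposition, same cost class).

-- ===== PORT A =====
-- Python: if length not in new_dict: new_dict[length] = [(word, key)] else: new_dict[length].append(tup)
def cdStepA (nd : PySem.Dict Int (List (String × String))) (key word : String) :
    PySem.Dict Int (List (String × String)) :=
  let length : Int := PySem.Str.len word
  let tup : String × String := (word, key)
  if !nd.contains length then nd.insert length [tup]
  else nd.insert length (nd.getD length [] ++ [tup])

def convert_dictionary (scores_dictionary : List (String × List String)) :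
    List (Int × List (String × String)) :=
  let d1 : PySem.Dict Int (List (String × String)) :=
    scores_dictionary.foldl
      (fun nd kv => kv.2.foldl (fun nd word => cdStepA nd kv.1 word) nd)
      PySem.Dict.empty
  (d1.keys.foldl
      (fun nd length =>
        nd.insert length (PySem.List.sorted (nd.getD length []) (fun x => x.1) false))
      d1).items

-- ===== PORT B =====
def convert_dictionary_alt (scores_dictionary : List (String × List String)) :
    List (Int × List (String × String)) :=
  let flat : List (String × String) :=
    scores_dictionary.flatMap (fun kv => kv.2.map (fun word => (word, kv.1)))
  let lengths : List Int := PySem.List.dedup (flat.map (fun p => PySem.Str.len p.1))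
  lengths.map (fun length =>
    (length,
     PySem.List.sorted (flat.filter (fun p => PySem.Str.len p.1 == length)) (fun x => x.1) false))

-- ===== PRECONDITION & SPEC =====
def Spec_convert_dictionary (scores_dictionary : List (String × List String)) (out : List (Int × List (String × String))) : Prop := out = convert_dictionary_alt scores_dictionary
instance (scores_dictionary : List (String × List String)) (out : List (Int × List (String × String))) : Decidable (Spec_convert_dictionary scores_dictionary out) := by unfold Spec_convert_dictionary; infer_instance

-- ===== CLAIM (what is proved, stated in full; the proofs are below) =====
def Claim_equal_convert_dictionary : Prop := ∀ (scores_dictionary : List (String × List String)), Dom_convert_dictionary scores_dictionary → Spec_convert_dictionary scores_dictionary (convert_dictionary scores_dictionary)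

-- ===== LEMMAS AND PROOFS =====

-- A's step equals a single Dict.modify appending the pair.
theorem cdStepA_eq_modify (nd : PySem.Dict Int (List (String × String))) (key word : String) :
    cdStepA nd key word
      = nd.modify (PySem.Str.len word) [] (fun v => v ++ [(word, key)]) := by
  unfold cdStepA PySem.Dict.modify
  by_cases h : nd.contains (PySem.Str.len word) = true
  · simp at h
    simp [h]
  · simp only [Bool.not_eq_true] at h
    rw [PySem.Dict.getD_of_not_contains nd [] h]
    simp at h
    simp [h]

-- A's nested fold is the fold over the flattened (word, key) list.
theorem nested_foldl_eq_flat {α : Type}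
    (f : α → String → String → α) :
    ∀ (l : List (String × List String)) (init : α),
      l.foldl (fun a kv => kv.2.foldl (fun a word => f a kv.1 word) a) init
        = (l.flatMap (fun kv => kv.2.map (fun word => (word, kv.1)))).foldl
            (fun a p => f a p.2 p.1) init := by
  intro l
  induction l with
  | nil => intro init; rfl
  | cons kv rest ih =>
    intro init
    simp only [List.foldl_cons, List.flatMap_cons, List.foldl_append, List.foldl_map, ih]

-- phase-2 loop: inserting g(current value) at each of a Nodup key list rewrites exactly those entries
theorem loop2_items (g : List (String × String) → List (String × String)) :
    ∀ (ks : List Int) (nd : PySem.Dict Int (List (String × String))),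
      ks.Nodup → nd.keys.Nodup → (∀ L ∈ ks, nd.contains L = true) →
      (ks.foldl (fun nd L => nd.insert L (g (nd.getD L []))) nd).items
        = nd.items.map (fun e => if e.1 ∈ ks then (e.1, g e.2) else e) := by
  intro ks
  induction ks with
  | nil =>
    intro nd _ _ _
    simp
  | cons k rest ih =>
    intro nd hks hnd hc
    have hck : nd.contains k = true := hc k (List.mem_cons_self ..)
    have hitems : (nd.insert k (g (nd.getD k []))).items
        = nd.items.map (fun p => if p.1 = k then (p.1, g p.2) else p) := by
      rw [PySem.Dict.items_insert_of_contains _ _ hck]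
      refine List.map_congr_left (fun p hp => ?_)
      by_cases hpk : p.1 = k
      · have hget : nd.getD k [] = p.2 := by
          have : (k, p.2) ∈ nd.items := by
            have : (p.1, p.2) ∈ nd.items := by simpa using hp
            simpa [hpk] using this
          exact PySem.Dict.getD_of_mem_items _ this hnd []
        simp [hpk, hget]
      · simp [hpk]
    have hkeys : (nd.insert k (g (nd.getD k []))).keys = nd.keys := by
      rw [PySem.Dict.keys_insert_of_contains _ _ hck]
    have hrest : ∀ L ∈ rest, (nd.insert k (g (nd.getD k []))).contains L = true := by
      intro L hL
      have := hc L (List.mem_cons_of_mem _ hL)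
      rw [PySem.Dict.contains_iff_mem_keys] at this ⊢
      rw [hkeys]; exact this
    rw [List.foldl_cons,
        ih _ (List.Nodup.of_cons hks) (hkeys ▸ hnd) hrest, hitems, List.map_map]
    have hknr : k ∉ rest := (List.nodup_cons.mp hks).1
    refine List.map_congr_left (fun p _ => ?_)
    by_cases hpk : p.1 = k
    · simp [Function.comp, hpk, hknr]
    · by_cases hpr : p.1 ∈ rest <;> simp [Function.comp, hpk, hpr]

-- the phase-1 dict, in flat foldl-modify form
theorem d1_eq (flat : List (String × String)) :
    flat.foldl (fun nd p => nd.modify (PySem.Str.len p.1) [] (fun v => v ++ [p]))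
        PySem.Dict.empty
      = (flat.map (fun p => ((PySem.Str.len p.1 : Int), p))).foldl
          (fun nd q => nd.modify q.1 [] (fun v => v ++ [q.2])) PySem.Dict.empty := by
  rw [List.foldl_map]

theorem d1_keys (flat : List (String × String)) :
    (flat.foldl (fun nd p => nd.modify (PySem.Str.len p.1) [] (fun v => v ++ [p]))
        PySem.Dict.empty).keys
      = PySem.List.dedup (flat.map (fun p => PySem.Str.len p.1)) := by
  rw [PySem.Dict.keys_foldl_modify_key]
  simp [PySem.Dict.keys_empty, PySem.Set.update_nil_left, PySem.List.dedup_eq_ofList]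

theorem d1_getD (flat : List (String × String)) (L : Int) :
    (flat.foldl (fun nd p => nd.modify (PySem.Str.len p.1) [] (fun v => v ++ [p]))
        PySem.Dict.empty).getD L []
      = flat.filter (fun p => PySem.Str.len p.1 == L) := by
  rw [d1_eq, PySem.Dict.getD_foldl_modify_append]
  simp [PySem.Dict.getD_empty, List.filter_map, Function.comp_def]

theorem d1_keys_nodup (flat : List (String × String)) :
    (flat.foldl (fun nd p => nd.modify (PySem.Str.len p.1) [] (fun v => v ++ [p]))
        PySem.Dict.empty).keys.Nodup := by
  rw [d1_keys]
  exact PySem.List.nodup_dedup _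

-- ===== VERDICT (by name: the statement is the Claim_ definition above) =====
theorem convert_dictionary_spec : Claim_equal_convert_dictionary := by
  intro scores _
  unfold Spec_convert_dictionary
  dsimp only [convert_dictionary, convert_dictionary_alt]
  set flat : List (String × String) :=
    scores.flatMap (fun kv => kv.2.map (fun word => (word, kv.1))) with hflat
  have hA1 : scores.foldl
      (fun nd kv => kv.2.foldl (fun nd word => cdStepA nd kv.1 word) nd) PySem.Dict.empty
      = flat.foldl (fun nd p => nd.modify (PySem.Str.len p.1) [] (fun v => v ++ [p]))
          PySem.Dict.empty := by
    rw [nested_foldl_eq_flat (fun nd key word => cdStepA nd key word)]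
    exact PySem.List.foldl_congr_mem _ _ _ _ (fun nd p _ => cdStepA_eq_modify nd p.2 p.1)
  set d1 := flat.foldl (fun nd p => nd.modify (PySem.Str.len p.1) [] (fun v => v ++ [p]))
      PySem.Dict.empty with hd1
  have hnd := d1_keys_nodup flat
  have hcont : ∀ L ∈ d1.keys, d1.contains L = true := by
    intro L hL; rw [PySem.Dict.contains_iff_mem_keys]; exact hL
  rw [hA1, loop2_items (fun v => PySem.List.sorted v (fun x => x.1) false) d1.keys d1 hnd hnd hcont,
      PySem.Dict.items_eq_map_keys d1 hnd [], List.map_map]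
  rw [d1_keys]
  refine List.map_congr_left (fun L hL => ?_)
  simp only [Function.comp_def]
  rw [if_pos hL, hd1, d1_getD]
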